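-- pv_equiv track=rewrite | github.com/unsupo/leetcode | minimum-number-of-operations-to-move-all-balls-to-each-box/Python3/minimum-number-of-operations-to-move-all-balls-to-each-box.py | best_minOperations
-- ===== SOURCE A (Python) =====
-- from typing import List
--
-- def best_minOperations(boxes: str) -> List[int]:
--         ans = [0]*len(boxes)
--         leftCount, leftCost, rightCount, rightCost, n = 0, 0, 0, 0, len(boxes)
--         for i in range(1, n): # start with the next since first cost is 0
--             if boxes[i-1] == '1': leftCount += 1 # check the previous one
--             leftCost += leftCount # each step move to right, the cost increases by # of 1s on the left
--             ans[i] = leftCost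
--         for i in range(n-2, -1, -1): # start with second from last since that move is 0
--             if boxes[i+1] == '1': rightCount += 1 # check last since we'll have to move that one
--             rightCost += rightCount
--             ans[i] += rightCost
--         return ans
-- ===== SOURCE B (Python) =====
-- from typing import List
--
-- def best_minOperations(boxes: str) -> List[int]:
--     n = len(boxes)
--     return [sum(abs(i - j) for j in range(n) if boxes[j] == '1') for i in range(n)]
-- ===== Notes on version B (the rewrite author's own statement) =====
-- stated objective: simpler
-- what changed: Replaces the two stateful prefix/suffix running-count sweeps over a mutated array with a direct one-line comprehension that recomputes each box's cost from the definition as the sum of abs(i-j) over the ball-containing boxes j.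
import Mathlib
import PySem

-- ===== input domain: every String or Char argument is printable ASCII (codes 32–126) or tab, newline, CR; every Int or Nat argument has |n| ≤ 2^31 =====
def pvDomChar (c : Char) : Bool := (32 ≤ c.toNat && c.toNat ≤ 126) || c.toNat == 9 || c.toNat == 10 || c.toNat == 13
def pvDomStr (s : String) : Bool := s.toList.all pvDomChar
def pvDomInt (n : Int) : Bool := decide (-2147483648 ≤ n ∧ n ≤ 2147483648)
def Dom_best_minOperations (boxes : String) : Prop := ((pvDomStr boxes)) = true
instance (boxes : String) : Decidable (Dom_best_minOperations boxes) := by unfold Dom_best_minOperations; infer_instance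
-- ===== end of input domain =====

-- B replaces A's two stateful prefix/suffix sweeps by the direct definitional
-- comprehension sum(|i-j| over '1'-boxes j); simpler, not faster (O(n^2) vs O(n)).


-- ===== PORT A =====
-- literal transliteration of A: ans = [0]*n; a left-to-right sweep maintaining
-- (leftCount, leftCost) writing ans[i]; a right-to-left sweep maintaining
-- (rightCount, rightCost) adding into ans[i].  All indices are in range, so
-- pyGetD/pySetD are exact here.
def best_minOperations (boxes : String) : List Int :=
  let l := boxes.toList
  let n : Int := (l.length : Int)
  let ans : List Int := List.replicate l.length 0
  let s1 := (PySem.List.pyRange 1 n 1).foldl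
    (fun (st : Int × Int × List Int) i =>
      let lc : Int := if PySem.List.pyGetD l (i - 1) ' ' = '1' then st.1 + 1 else st.1
      let lcost : Int := st.2.1 + lc
      (lc, lcost, PySem.List.pySetD st.2.2 i lcost)) (0, 0, ans)
  let s2 := (PySem.List.pyRange (n - 2) (-1) (-1)).foldl
    (fun (st : Int × Int × List Int) i =>
      let rc : Int := if PySem.List.pyGetD l (i + 1) ' ' = '1' then st.1 + 1 else st.1
      let rcost : Int := st.2.1 + rc
      (rc, rcost, PySem.List.pySetD st.2.2 i (PySem.List.pyGetD st.2.2 i 0 + rcost)))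
    (0, 0, s1.2.2)
  s2.2.2

-- ===== PORT B =====
-- literal transliteration of B: [sum(abs(i-j) for j in range(n) if boxes[j]=='1') for i in range(n)]
def best_minOperations_alt (boxes : String) : List Int :=
  let l := boxes.toList
  let n : Int := (l.length : Int)
  (PySem.List.pyRange 0 n 1).map (fun i =>
    (((PySem.List.pyRange 0 n 1).filter
        (fun j => PySem.List.pyGetD l j ' ' == '1')).map
      (fun j => |i - j|)).sum)

-- ===== PRECONDITION & SPEC =====
def Spec_best_minOperations (boxes : String) (out : List Int) : Prop := out = best_minOperations_alt boxes
instance (boxes : String) (out : List Int) : Decidable (Spec_best_minOperations boxes out) := by unfold Spec_best_minOperations; infer_instance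

-- ===== CLAIM (what is proved, stated in full; the proofs are below) =====
def Claim_equal_best_minOperations : Prop := ∀ (boxes : String), Dom_best_minOperations boxes → Spec_best_minOperations boxes (best_minOperations boxes)

-- ===== LEMMAS AND PROOFS =====

-- 0/1 weight of box j
def pvOne (l : List Char) (j : ℕ) : Int := if l.getD j ' ' = '1' then 1 else 0

-- number of '1' boxes among indices < p  (indices ≥ p for pvCntR)
def pvCntL (l : List Char) (p : ℕ) : Int :=
  ((List.range l.length).map (fun j => if j < p then pvOne l j else 0)).sum
def pvCntR (l : List Char) (p : ℕ) : Int :=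
  ((List.range l.length).map (fun j => if p ≤ j then pvOne l j else 0)).sum

-- left cost Σ_{j<p} (p-j)·one j and right cost Σ_{j>p} (j-p)·one j
def pvLf (l : List Char) (p : ℕ) : Int :=
  ((List.range l.length).map (fun j => if j < p then ((p : Int) - j) * pvOne l j else 0)).sum
def pvRf (l : List Char) (p : ℕ) : Int :=
  ((List.range l.length).map (fun j => if p < j then ((j : Int) - p) * pvOne l j else 0)).sum

theorem pvLf_zero (l : List Char) : pvLf l 0 = 0 := by
  simp [pvLf]

theorem pvRf_last (l : List Char) (p : ℕ) (hp : l.length ≤ p + 1) : pvRf l p = 0 := by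
  unfold pvRf
  rw [List.sum_eq_zero]
  intro x hx
  simp only [List.mem_map, List.mem_range] at hx
  obtain ⟨j, hj, rfl⟩ := hx
  have : ¬ p < j := by omega
  simp [this]

theorem pvSum_split (l : List Char) (f g : ℕ → Int) :
    ((List.range l.length).map (fun j => f j + g j)).sum
      = ((List.range l.length).map f).sum + ((List.range l.length).map g).sum := by
  exact PySem.List.sum_map_add_int (List.range l.length) f g

theorem pvSum_congr (n : ℕ) (f g : ℕ → Int) (h : ∀ j < n, f j = g j) :
    ((List.range n).map f).sum = ((List.range n).map g).sum := by
  have : (List.range n).map f = (List.range n).map g := by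
    apply List.map_congr_left
    intro j hj
    exact h j (List.mem_range.mp hj)
  rw [this]

theorem pvSum_spike (n p : ℕ) (hp : p < n) (v : ℕ → Int) :
    ((List.range n).map (fun j => if j = p then v j else 0)).sum = v p := by
  induction n with
  | zero => omega
  | succ m ih =>
    rw [List.range_succ, List.map_append, List.sum_append]
    by_cases h : p = m
    · subst h
      have : ((List.range p).map (fun j => if j = p then v j else 0)).sum = 0 := by
        apply List.sum_eq_zero
        intro x hx
        simp only [List.mem_map, List.mem_range] at hx
        obtain ⟨j, hj, rfl⟩ := hx
        simp only [ite_eq_right_iff]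
        intro h; omega
      simp [this]
    · have hpm : p < m := by omega
      rw [ih hpm]
      simp only [List.map_cons, List.map_nil, List.sum_cons, List.sum_nil]
      rw [if_neg (by omega : ¬ m = p)]
      ring

theorem pvCntL_succ (l : List Char) (p : ℕ) (hp : p < l.length) :
    pvCntL l (p + 1) = pvCntL l p + pvOne l p := by
  unfold pvCntL
  have h1 : ((List.range l.length).map (fun j => if j < p + 1 then pvOne l j else 0)).sum
      = ((List.range l.length).map (fun j =>
          (if j < p then pvOne l j else 0) + (if j = p then pvOne l j else 0))).sum := by
    apply pvSum_congr
    intro j hj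
    split_ifs <;> try simp
    all_goals omega
  rw [h1, pvSum_split, pvSum_spike l.length p hp]

theorem pvLf_succ (l : List Char) (p : ℕ) :
    pvLf l (p + 1) = pvLf l p + pvCntL l (p + 1) := by
  unfold pvLf pvCntL
  rw [← pvSum_split]
  apply pvSum_congr
  intro j hj
  rcases Nat.lt_trichotomy j p with h | h | h
  · rw [if_pos (by omega : j < p + 1), if_pos h, if_pos (by omega : j < p + 1)]
    push_cast; ring
  · subst h
    rw [if_pos (by omega : j < j + 1), if_neg (by omega : ¬ j < j),
        if_pos (by omega : j < j + 1)]
    push_cast; ring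
  · rw [if_neg (by omega : ¬ j < p + 1), if_neg (by omega : ¬ j < p),
        if_neg (by omega : ¬ j < p + 1)]
    ring

theorem pvRf_pred (l : List Char) (p : ℕ) :
    pvRf l p = pvRf l (p + 1) + pvCntR l (p + 1) := by
  unfold pvRf pvCntR
  rw [← pvSum_split]
  apply pvSum_congr
  intro j hj
  rcases Nat.lt_trichotomy j (p + 1) with h | h | h
  · rw [if_neg (by omega : ¬ p < j), if_neg (by omega : ¬ p + 1 < j),
        if_neg (by omega : ¬ p + 1 ≤ j)]
    ring
  · subst h
    rw [if_pos (by omega : p < p + 1), if_neg (by omega : ¬ p + 1 < p + 1),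
        if_pos (by omega : p + 1 ≤ p + 1)]
    push_cast; ring
  · rw [if_pos (by omega : p < j), if_pos h, if_pos (by omega : p + 1 ≤ j)]
    push_cast; ring

-- the two loop bodies of port A, named for the invariant proofs (defeq to the inline lambdas)
def pvStep1 (l : List Char) (st : Int × Int × List Int) (i : Int) : Int × Int × List Int :=
  let lc : Int := if PySem.List.pyGetD l (i - 1) ' ' = '1' then st.1 + 1 else st.1
  let lcost : Int := st.2.1 + lc
  (lc, lcost, PySem.List.pySetD st.2.2 i lcost)

def pvStep2 (l : List Char) (st : Int × Int × List Int) (i : Int) : Int × Int × List Int :=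
  let rc : Int := if PySem.List.pyGetD l (i + 1) ' ' = '1' then st.1 + 1 else st.1
  let rcost : Int := st.2.1 + rc
  (rc, rcost, PySem.List.pySetD st.2.2 i (PySem.List.pyGetD st.2.2 i 0 + rcost))

theorem pvA_eq (boxes : String) :
    best_minOperations boxes =
      ((PySem.List.pyRange ((boxes.toList.length : Int) - 2) (-1) (-1)).foldl
        (pvStep2 boxes.toList)
        (0, 0, ((PySem.List.pyRange 1 (boxes.toList.length : Int) 1).foldl
                  (pvStep1 boxes.toList)
                  (0, 0, List.replicate boxes.toList.length 0)).2.2)).2.2 := rfl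

theorem pvCntL_zero (l : List Char) : pvCntL l 0 = 0 := by
  simp [pvCntL]

theorem pvCntR_len (l : List Char) (p : ℕ) (hp : l.length ≤ p) : pvCntR l p = 0 := by
  unfold pvCntR
  rw [List.sum_eq_zero]
  intro x hx
  simp only [List.mem_map, List.mem_range] at hx
  obtain ⟨j, hj, rfl⟩ := hx
  rw [if_neg (by omega)]

theorem pvCntR_pred (l : List Char) (p : ℕ) (hp : p < l.length) :
    pvCntR l p = pvOne l p + pvCntR l (p + 1) := by
  unfold pvCntR
  have h1 : ((List.range l.length).map (fun j => if p ≤ j then pvOne l j else 0)).sum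
      = ((List.range l.length).map (fun j =>
          (if j = p then pvOne l j else 0) + (if p + 1 ≤ j then pvOne l j else 0))).sum := by
    apply pvSum_congr
    intro j hj
    rcases Nat.lt_trichotomy j p with h | h | h
    · rw [if_neg (by omega : ¬ p ≤ j), if_neg (by omega : ¬ j = p),
          if_neg (by omega : ¬ p + 1 ≤ j)]
      ring
    · subst h
      rw [if_pos (by omega : j ≤ j), if_pos rfl, if_neg (by omega : ¬ j + 1 ≤ j)]
      ring
    · rw [if_pos (by omega : p ≤ j), if_neg (by omega : ¬ j = p),
          if_pos (by omega : p + 1 ≤ j)]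
      ring
  rw [h1, pvSum_split, pvSum_spike l.length p hp]

-- setting one cell of a range-tabulated list retabulates it
theorem pvSet_map_range (n : ℕ) (f : ℕ → Int) (p : ℕ) (v : Int) :
    (((List.range n).map f).set p v)
      = (List.range n).map (fun q => if q = p then v else f q) := by
  apply List.ext_getElem
  · simp
  · intro k h1 h2
    simp only [List.getElem_set, List.getElem_map, List.getElem_range]
    simp only [List.length_set, List.length_map, List.length_range] at h1
    by_cases h : k = p
    · subst h; simp
    · simp [h, Ne.symm h]
    
theorem pvGetD_map_range (n : ℕ) (f : ℕ → Int) (p : ℕ) (hp : p < n) :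
    ((List.range n).map f).getD p 0 = f p := by
  rw [List.getD_eq_getElem _ _ (by simpa using hp)]
  simp

-- invariant of A's first (left-to-right) loop
theorem pvLoop1 (l : List Char) (m : ℕ) (hm : m + 1 ≤ l.length) :
    (List.range m).foldl (fun st (k : ℕ) => pvStep1 l st (1 + (k : Int)))
        (0, 0, List.replicate l.length 0)
      = (pvCntL l m, pvLf l m,
         (List.range l.length).map (fun p => if 1 ≤ p ∧ p ≤ m then pvLf l p else 0)) := by
  induction m with
  | zero =>
    simp only [List.range_zero, List.foldl_nil]
    refine congrArg₂ _ (pvCntL_zero l).symm (congrArg₂ _ (pvLf_zero l).symm ?_)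
    apply List.ext_getElem
    · simp
    · intro k h1 h2
      simp only [List.getElem_replicate, List.getElem_map, List.getElem_range]
      rw [if_neg (by omega)]
  | succ m ih =>
    rw [List.range_succ, List.foldl_append, List.foldl_cons, List.foldl_nil,
        ih (by omega)]
    have hcast2 : (1 : Int) + (m : Int) = (((m + 1 : ℕ)) : Int) := by push_cast; ring
    have hcast : (((m + 1 : ℕ)) : Int) - 1 = ((m : ℕ) : Int) := by push_cast; ring
    unfold pvStep1
    simp only [hcast2, hcast, PySem.List.pyGetD_natCast, PySem.List.pySetD_natCast,
      ← List.getD_eq_getElem?_getD]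
    have hlc : (if l.getD m ' ' = '1' then pvCntL l m + 1 else pvCntL l m)
        = pvCntL l (m + 1) := by
      rw [pvCntL_succ l m (by omega)]
      unfold pvOne
      by_cases h : l.getD m ' ' = '1'
      · rw [if_pos h, if_pos h]
      · rw [if_neg h, if_neg h]; ring
    rw [hlc]
    have hlcost : pvLf l m + pvCntL l (m + 1) = pvLf l (m + 1) := (pvLf_succ l m).symm
    rw [hlcost]
    refine congrArg₂ _ rfl (congrArg₂ _ rfl ?_)
    rw [pvSet_map_range]
    apply List.map_congr_left
    intro p hp
    rw [List.mem_range] at hp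
    by_cases h : p = m + 1
    · subst h
      rw [if_pos rfl, if_pos (by omega)]
    · rw [if_neg h]
      by_cases h2 : 1 ≤ p ∧ p ≤ m
      · rw [if_pos h2, if_pos (by omega)]
      · rw [if_neg h2, if_neg (by omega)]

-- invariant of A's second (right-to-left) loop
theorem pvLoop2 (l : List Char) (m : ℕ) (hN : 1 ≤ l.length) (hm : m ≤ l.length - 1) :
    (List.range m).foldl (fun st (k : ℕ) => pvStep2 l st ((l.length : Int) - 2 - (k : Int)))
        (0, 0, (List.range l.length).map
                 (fun p => if 1 ≤ p ∧ p ≤ l.length - 1 then pvLf l p else 0))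
      = (pvCntR l (l.length - m), pvRf l (l.length - 1 - m),
         (List.range l.length).map
           (fun p => (if 1 ≤ p ∧ p ≤ l.length - 1 then pvLf l p else 0)
                     + if l.length - 1 - m ≤ p ∧ p + 1 ≤ l.length - 1 then pvRf l p else 0)) := by
  induction m with
  | zero =>
    simp only [List.range_zero, List.foldl_nil, Nat.sub_zero]
    refine congrArg₂ _ (pvCntR_len l l.length le_rfl).symm
      (congrArg₂ _ (pvRf_last l (l.length - 1) (by omega)).symm ?_)
    apply List.map_congr_left
    intro p hp
    rw [List.mem_range] at hp
    rw [if_neg (by omega : ¬ (l.length - 1 ≤ p ∧ p + 1 ≤ l.length - 1)), add_zero]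
  | succ m ih =>
    rw [List.range_succ, List.foldl_append, List.foldl_cons, List.foldl_nil,
        ih (by omega)]
    have hq2 : m + 2 ≤ l.length := by omega
    set q : ℕ := l.length - 2 - m with hqd
    have hq : q < l.length := by omega
    have hcast : (l.length : Int) - 2 - (m : Int) = (q : Int) := by omega
    have hcast3 : (q : Int) + 1 = ((q + 1 : ℕ) : Int) := by push_cast; ring
    have e1 : l.length - 1 - m = q + 1 := by omega
    have e2 : l.length - m = q + 2 := by omega
    have e3 : l.length - (m + 1) = q + 1 := by omega
    have e4 : l.length - 1 - (m + 1) = q := by omega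
    unfold pvStep2
    simp only [hcast, hcast3, PySem.List.pyGetD_natCast, PySem.List.pySetD_natCast,
      ← List.getD_eq_getElem?_getD]
    have hrc : (if l.getD (q + 1) ' ' = '1'
          then pvCntR l (l.length - m) + 1 else pvCntR l (l.length - m))
        = pvCntR l (q + 1) := by
      rw [e2, pvCntR_pred l (q + 1) (by omega)]
      unfold pvOne
      by_cases h : l.getD (q + 1) ' ' = '1'
      · rw [if_pos h, if_pos h]; ring
      · rw [if_neg h, if_neg h]; ring
    rw [hrc, e1, e3, e4, ← pvRf_pred l q]
    refine congrArg₂ _ rfl (congrArg₂ _ rfl ?_)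
    rw [pvGetD_map_range _ _ _ hq]
    rw [if_neg (by omega : ¬ (q + 1 ≤ q ∧ q + 1 ≤ l.length - 1)), add_zero,
        pvSet_map_range]
    apply List.map_congr_left
    intro p hp
    rw [List.mem_range] at hp
    by_cases h : p = q
    · subst h
      rw [if_pos rfl, if_pos (by omega : q ≤ q ∧ q + 1 ≤ l.length - 1)]
    · rw [if_neg h]
      by_cases h2 : q ≤ p ∧ p + 1 ≤ l.length - 1
      · rw [if_pos h2, if_pos (by omega : q + 1 ≤ p ∧ p + 1 ≤ l.length - 1)]
      · rw [if_neg h2, if_neg (by omega : ¬ (q + 1 ≤ p ∧ p + 1 ≤ l.length - 1))]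

-- sum over a filtered list as a sum of guarded terms
theorem pvFilterSum (xs : List Int) (f : Int → Int) (qb : Int → Bool) :
    ((xs.filter qb).map f).sum = (xs.map (fun j => if qb j then f j else 0)).sum := by
  induction xs with
  | nil => rfl
  | cons x t ih =>
    by_cases h : qb x
    · simp [List.filter_cons, h, ih]
    · simp [List.filter_cons, h, ih]

-- A's two sweeps compute Lf p + Rf p at every index p
theorem pvA_char (boxes : String) :
    best_minOperations boxes
      = (List.range boxes.toList.length).map
          (fun p => pvLf boxes.toList p + pvRf boxes.toList p) := by
  rw [pvA_eq]
  by_cases hN : boxes.toList.length = 0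
  · rw [PySem.List.pyRange_one_eq_nil (by simp [hN]),
        PySem.List.pyRange_neg_one_eq_nil (by simp [hN])]
    simp [hN]
  · have hN1 : 1 ≤ boxes.toList.length := by omega
    rw [PySem.List.pyRange_one, PySem.List.pyRange_neg_one, List.foldl_map, List.foldl_map]
    have ht1 : ((boxes.toList.length : Int) - 1).toNat = boxes.toList.length - 1 := by omega
    have ht2 : ((boxes.toList.length : Int) - 2 - (-1)).toNat = boxes.toList.length - 1 := by
      omega
    rw [ht1, ht2, pvLoop1 boxes.toList (boxes.toList.length - 1) (by omega)]
    rw [show ((pvCntL boxes.toList (boxes.toList.length - 1),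
               pvLf boxes.toList (boxes.toList.length - 1),
               (List.range boxes.toList.length).map
                 (fun p => if 1 ≤ p ∧ p ≤ boxes.toList.length - 1
                           then pvLf boxes.toList p else 0))).2.2
          = (List.range boxes.toList.length).map
              (fun p => if 1 ≤ p ∧ p ≤ boxes.toList.length - 1
                        then pvLf boxes.toList p else 0) from rfl]
    rw [pvLoop2 boxes.toList (boxes.toList.length - 1) hN1 le_rfl]
    apply List.map_congr_left
    intro p hp
    rw [List.mem_range] at hp
    by_cases hp1 : p + 1 ≤ boxes.toList.length - 1
    · rw [if_pos (by omega : boxes.toList.length - 1 - (boxes.toList.length - 1) ≤ p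
                             ∧ p + 1 ≤ boxes.toList.length - 1)]
      by_cases hp0 : 1 ≤ p
      · rw [if_pos (by omega : 1 ≤ p ∧ p ≤ boxes.toList.length - 1)]
      · have : p = 0 := by omega
        subst this
        rw [if_neg (by omega : ¬ (1 ≤ 0 ∧ 0 ≤ boxes.toList.length - 1)), pvLf_zero,
            zero_add]
    · have hlast : boxes.toList.length ≤ p + 1 := by omega
      rw [if_neg (by omega : ¬ (boxes.toList.length - 1 - (boxes.toList.length - 1) ≤ p
                                ∧ p + 1 ≤ boxes.toList.length - 1)),
          pvRf_last boxes.toList p hlast, add_zero, add_zero]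
      by_cases hp0 : 1 ≤ p
      · rw [if_pos (by omega : 1 ≤ p ∧ p ≤ boxes.toList.length - 1)]
      · have : p = 0 := by omega
        subst this
        rw [if_neg (by omega : ¬ (1 ≤ 0 ∧ 0 ≤ boxes.toList.length - 1)), pvLf_zero]

theorem pvB_eq (boxes : String) :
    best_minOperations_alt boxes
      = (PySem.List.pyRange 0 (boxes.toList.length : Int) 1).map (fun i =>
          (((PySem.List.pyRange 0 (boxes.toList.length : Int) 1).filter
              (fun j => PySem.List.pyGetD boxes.toList j ' ' == '1')).map
            (fun j => |i - j|)).sum) := rfl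

-- B's comprehension computes Lf p + Rf p at every index p
theorem pvB_char (boxes : String) :
    best_minOperations_alt boxes
      = (List.range boxes.toList.length).map
          (fun p => pvLf boxes.toList p + pvRf boxes.toList p) := by
  rw [pvB_eq, PySem.List.pyRange_one 0]
  have ht : ((boxes.toList.length : Int) - 0).toNat = boxes.toList.length := by omega
  rw [ht, List.map_map]
  apply List.map_congr_left
  intro p hp
  rw [List.mem_range] at hp
  simp only [Function.comp]
  rw [pvFilterSum, List.map_map]
  unfold pvLf pvRf
  rw [← pvSum_split]
  apply pvSum_congr
  intro k hk
  simp only [Function.comp, zero_add, PySem.List.pyGetD_natCast,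
    ← List.getD_eq_getElem?_getD, beq_iff_eq]
  unfold pvOne
  by_cases hc : boxes.toList.getD k ' ' = '1'
  · rw [if_pos (by exact_mod_cast hc), if_pos hc]
    rcases Nat.lt_trichotomy k p with h | h | h
    · rw [if_pos h, if_neg (by omega : ¬ p < k),
          abs_of_nonneg (by push_cast; omega : (0:Int) ≤ (p : Int) - (k : Int))]
      ring
    · subst h
      simp
    · rw [if_neg (by omega : ¬ k < p), if_pos h,
          abs_of_nonpos (by push_cast; omega : (p : Int) - (k : Int) ≤ 0)]
      ring
  · rw [if_neg (by exact_mod_cast hc)]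
    rw [if_neg hc]
    by_cases h1 : k < p <;> by_cases h2 : p < k <;>
      simp [h1, h2]

theorem best_minOperations_spec : Claim_equal_best_minOperations := by
  intro boxes _
  unfold Spec_best_minOperations
  rw [pvA_char, pvB_char]
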